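-- pv_equiv track=rewrite | github.com/cirosantilli/project-euler-solutions | solvers/877.py | xor_product
-- ===== SOURCE A (Python) =====
-- def xor_product(x: int, y: int) -> int:
--     """Carryless multiplication (GF(2)[z]) of nonnegative integers."""
--     if x < 0 or y < 0:
--         raise ValueError("xor_product is defined here for nonnegative integers only")
--     res = 0
--     while y:
--         if y & 1:
--             res ^= x
--         y >>= 1
--         x <<= 1
--     return res
-- ===== SOURCE B (Python) =====
-- def _clmul(x: int, y: int) -> int:
--     """Recursive carryless product: halve x, double the recursive result."""
--     if x == 0:
--         return 0
--     q, r = divmod(x, 2)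
--     return (y if r else 0) ^ (_clmul(q, y) * 2)
--
--
-- def xor_product(x: int, y: int) -> int:
--     """Carryless multiplication (GF(2)[z]) of nonnegative integers."""
--     if x < 0 or y < 0:
--         raise ValueError("xor_product is defined here for nonnegative integers only")
--     return _clmul(x, y)
-- ===== Notes on version B (the rewrite author's own statement) =====
-- stated objective: alternative
-- what changed: Replaces A's iterative accumulator loop over y's bits (mutating x and y with shifts and xoring shifted x into res) by a pure structural recursion on the other operand x: divmod x by 2, xor in y when the low bit is set, and double the recursive result on return; correctness is commutativity of carryless multiplication.
import Mathlib
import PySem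

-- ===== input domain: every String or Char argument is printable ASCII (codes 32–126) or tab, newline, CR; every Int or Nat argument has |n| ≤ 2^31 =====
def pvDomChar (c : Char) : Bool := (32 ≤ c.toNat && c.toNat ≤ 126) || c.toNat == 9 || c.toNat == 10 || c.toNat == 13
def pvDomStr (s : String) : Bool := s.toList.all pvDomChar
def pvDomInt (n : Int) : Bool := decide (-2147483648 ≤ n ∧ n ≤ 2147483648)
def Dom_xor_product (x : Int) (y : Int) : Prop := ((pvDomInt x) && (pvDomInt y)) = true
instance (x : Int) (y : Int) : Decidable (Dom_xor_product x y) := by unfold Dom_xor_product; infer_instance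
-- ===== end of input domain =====

-- B replaces A's iterative accumulator loop over y's bits by a pure structural recursion on x
-- (divmod by 2, double the recursive result); objective: alternative algorithm, same cost class.

-- ===== PORT A =====
-- A's `while y:` loop; the loop is only reached with y ≥ 0 (A raises on negatives, excluded
-- by Pre_), so the `0 < y` continue-guard is exactly Python's `y` truth test there (totality guard).
def xorLoop (x y res : Int) : Int :=
  if h : 0 < y then
    xorLoop (x <<< (1 : Nat)) (y >>> (1 : Nat))
      (if PySem.Int.band y 1 = 1 then PySem.Int.bxor res x else res)
  else res
termination_by y.toNat
decreasing_by
  obtain ⟨m, rfl⟩ := Int.eq_ofNat_of_zero_le (le_of_lt h)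
  have : ((m : Int) >>> (1 : Nat)) = ((m >>> 1 : Nat) : Int) := rfl
  rw [this]
  simp only [Int.toNat_natCast, Nat.shiftRight_succ, Nat.shiftRight_zero]
  omega

-- A raises ValueError on negative input (excluded by Pre_); the port returns 0 there.
def xor_product (x : Int) (y : Int) : Int :=
  if x < 0 ∨ y < 0 then 0 else xorLoop x y 0

-- ===== PORT B =====
-- Source B's _clmul; only ever called with x ≥ 0 (xor_product raises on negatives first), where
-- the `0 < x` guard is exactly Python's `x == 0` base case (totality guard: Python's _clmul
-- never returns on a negative x, which is unreachable).
def clmul (x y : Int) : Int :=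
  if h : 0 < x then
    let q := PySem.Int.floordiv x 2
    let r := PySem.Int.mod x 2
    PySem.Int.bxor (if r ≠ 0 then y else 0) (clmul q y * 2)
  else 0
termination_by x.toNat
decreasing_by
  obtain ⟨m, rfl⟩ := Int.eq_ofNat_of_zero_le (le_of_lt h)
  have hq : PySem.Int.floordiv (m : Int) 2 = ((m / 2 : Nat) : Int) := by
    exact_mod_cast PySem.Int.floordiv_natCast m 2
  rw [hq]
  simp only [Int.toNat_natCast]
  omega

def xor_product_alt (x : Int) (y : Int) : Int :=
  if x < 0 ∨ y < 0 then 0 else clmul x y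

-- ===== PRECONDITION & SPEC =====
-- A raises ValueError exactly when x < 0 or y < 0; Pre_ admits all other inputs.
def Pre_xor_product (x : Int) (y : Int) : Prop := 0 ≤ x ∧ 0 ≤ y
instance (x : Int) (y : Int) : Decidable (Pre_xor_product x y) := by
  unfold Pre_xor_product; infer_instance
def pvWitness_xor_product : Int × Int := (3, 5)

def Spec_xor_product (x : Int) (y : Int) (out : Int) : Prop := out = xor_product_alt x y
instance (x : Int) (y : Int) (out : Int) : Decidable (Spec_xor_product x y out) := by
  unfold Spec_xor_product; infer_instance

-- ===== CLAIM (what is proved, stated in full; the proofs are below) =====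
def Claim_equal_xor_product : Prop := ∀ (x : Int) (y : Int), Dom_xor_product x y → Pre_xor_product x y → Spec_xor_product x y (xor_product x y)

-- ===== LEMMAS AND PROOFS =====

-- Nat models of the two ports.
def aN (x y r : Nat) : Nat :=
  if y = 0 then r else aN (x * 2) (y / 2) (if y % 2 = 1 then r ^^^ x else r)

def bN (x y : Nat) : Nat :=
  if x = 0 then 0 else (if x % 2 ≠ 0 then y else 0) ^^^ bN (x / 2) y * 2

-- list of set-bit indices of n, starting at index i
def bitsN (n i : Nat) : List Nat :=
  if n = 0 then [] else (if n % 2 = 1 then [i] else []) ++ bitsN (n / 2) (i + 1)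

-- xor-fold of f over a list
def X (f : Nat → Nat) (l : List Nat) : Nat := l.foldl (fun r j => r ^^^ f j) 0

theorem two_mul_xor (a b : Nat) : 2 * a ^^^ 2 * b = 2 * (a ^^^ b) := by
  rw [← Nat.bit_false_apply, ← Nat.bit_false_apply, ← Nat.bit_false_apply, Nat.xor_bit]
  rfl

theorem xor_one_of_even (a : Nat) : 1 ^^^ 2 * a = 2 * a + 1 := by
  have h1 : (1 : Nat) = Nat.bit true 0 := rfl
  rw [h1, ← Nat.bit_false_apply, Nat.xor_bit]
  simp [Nat.bit_true_apply]

theorem foldl_xor_acc (f : Nat → Nat) (l : List Nat) (r : Nat) :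
    l.foldl (fun r j => r ^^^ f j) r = r ^^^ X f l := by
  induction l generalizing r with
  | nil => simp [X]
  | cons a t ih =>
    simp only [List.foldl_cons, X] at *
    rw [ih (r ^^^ f a), ih (0 ^^^ f a)]
    simp [Nat.xor_assoc]

theorem X_cons (f : Nat → Nat) (a : Nat) (l : List Nat) : X f (a :: l) = f a ^^^ X f l := by
  simp only [X, List.foldl_cons, Nat.zero_xor]
  exact foldl_xor_acc f l (f a)

theorem X_append (f : Nat → Nat) (l₁ l₂ : List Nat) :
    X f (l₁ ++ l₂) = X f l₁ ^^^ X f l₂ := by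
  simp only [X, List.foldl_append]
  rw [foldl_xor_acc]
  rfl

theorem X_map (f : Nat → Nat) (g : Nat → Nat) (l : List Nat) :
    X f (l.map g) = X (fun k => f (g k)) l := by
  simp [X, List.foldl_map]

theorem X_zero (l : List Nat) : X (fun _ => 0) l = 0 := by
  induction l with
  | nil => rfl
  | cons a t ih => rw [X_cons, ih]; rfl

theorem X_xor (p q : Nat → Nat) (l : List Nat) :
    X (fun j => p j ^^^ q j) l = X p l ^^^ X q l := by
  induction l with
  | nil => simp [X]
  | cons a t ih =>
    rw [X_cons, X_cons, X_cons, ih]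
    rw [Nat.xor_assoc, Nat.xor_assoc]
    congr 1
    rw [← Nat.xor_assoc, ← Nat.xor_assoc, Nat.xor_comm (X p t) (q a)]

theorem X_swap (g : Nat → Nat → Nat) (l₁ l₂ : List Nat) :
    X (fun i => X (g i) l₂) l₁ = X (fun j => X (fun i => g i j) l₁) l₂ := by
  induction l₁ with
  | nil =>
    simp only [X, List.foldl_nil]
    simpa [X] using (X_zero l₂).symm
  | cons a t ih =>
    rw [X_cons, ih, ← X_xor]
    congr 1
    funext j
    rw [X_cons]

theorem X_two_mul (f : Nat → Nat) (l : List Nat) :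
    X (fun j => 2 * f j) l = 2 * X f l := by
  induction l with
  | nil => simp [X]
  | cons a t ih => rw [X_cons, X_cons, ih, two_mul_xor]

theorem scale_xor (a b i : Nat) : a * 2 ^ i ^^^ b * 2 ^ i = (a ^^^ b) * 2 ^ i := by
  induction i with
  | zero => simp
  | succ k ih =>
    have h : ∀ c : Nat, c * 2 ^ (k + 1) = 2 * (c * 2 ^ k) := by intro c; ring
    rw [h a, h b, h (a ^^^ b), two_mul_xor, ih]

-- shifting the start index shifts every emitted index
theorem bitsN_shift : ∀ n i : Nat, bitsN n (i + 1) = (bitsN n i).map (· + 1) := by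
  intro n
  induction n using Nat.strong_induction_on with
  | _ n ih =>
    intro i
    have hz : ∀ j, bitsN 0 j = [] := fun j => by rw [bitsN]; simp
    by_cases h : n = 0
    · subst h; simp [hz]
    · conv_lhs => rw [bitsN]
      conv_rhs => rw [bitsN]
      simp only [h, if_false]
      rw [ih (n / 2) (by omega) (i + 1)]
      by_cases hp : n % 2 = 1 <;> simp [hp]

-- xor of the distinct powers 2^(k+s) over the set-bit indices of n (started at i) is n * 2^(i+s)
theorem X_pow_bitsN : ∀ n i s : Nat, X (fun k => 2 ^ (k + s)) (bitsN n i) = n * 2 ^ (i + s) := by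
  intro n
  induction n using Nat.strong_induction_on with
  | _ n ih =>
    intro i s
    rw [bitsN]
    by_cases h : n = 0
    · simp [h, X]
    · simp only [h, if_false]
      rw [X_append, ih (n / 2) (by omega) (i + 1) s]
      by_cases hp : n % 2 = 1
      · simp only [hp, if_pos]
        have h1 : X (fun k => 2 ^ (k + s)) [i] = 1 * 2 ^ (i + s) := by
          simp [X]
        have h2 : n / 2 * 2 ^ (i + 1 + s) = (2 * (n / 2)) * 2 ^ (i + s) := by
          rw [show i + 1 + s = (i + s) + 1 from by omega, pow_succ]
          ring
        rw [h1, h2, scale_xor, xor_one_of_even]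
        congr 1
        omega
      · simp only [hp, if_false]
        have h0 : X (fun k => 2 ^ (k + s)) ([] : List Nat) = 0 := rfl
        rw [h0, Nat.zero_xor]
        rw [show i + 1 + s = (i + s) + 1 from by omega, pow_succ]
        have : n / 2 * 2 = n := by omega
        rw [← Nat.mul_assoc, Nat.mul_right_comm, this]

-- A's loop computes r ^^^ (xor over set bits j of y of x * 2^j)
theorem aN_eq : ∀ y x r : Nat, aN x y r = r ^^^ X (fun j => x * 2 ^ j) (bitsN y 0) := by
  intro y
  induction y using Nat.strong_induction_on with
  | _ y ih =>
    intro x r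
    rw [aN, bitsN]
    by_cases h : y = 0
    · simp [h, X]
    · simp only [h, if_false]
      rw [ih (y / 2) (by omega) (x * 2) _, X_append]
      have hmap : bitsN (y / 2) 1 = (bitsN (y / 2) 0).map (· + 1) := bitsN_shift (y / 2) 0
      have hX : X (fun j => x * 2 ^ j) (bitsN (y / 2) 1)
          = X (fun j => x * 2 * 2 ^ j) (bitsN (y / 2) 0) := by
        rw [hmap, X_map]
        congr 1
        funext k
        rw [pow_succ]
        ring
      rw [hX]
      by_cases hp : y % 2 = 1
      · simp only [hp, if_pos]
        have h1 : X (fun j => x * 2 ^ j) [0] = x := by simp [X]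
        rw [h1, Nat.xor_assoc]
      · simp only [hp, if_false]
        have h0 : X (fun j => x * 2 ^ j) ([] : List Nat) = 0 := rfl
        rw [h0, Nat.zero_xor]

-- B's recursion computes the xor over set bits i of x of y * 2^i
theorem bN_eq : ∀ x y : Nat, bN x y = X (fun i => y * 2 ^ i) (bitsN x 0) := by
  intro x
  induction x using Nat.strong_induction_on with
  | _ x ih =>
    intro y
    rw [bN, bitsN]
    by_cases h : x = 0
    · simp [h, X]
    · simp only [h, if_false]
      rw [X_append, ih (x / 2) (by omega) y]
      have hmap : bitsN (x / 2) 1 = (bitsN (x / 2) 0).map (· + 1) := bitsN_shift (x / 2) 0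
      have hX : X (fun i => y * 2 ^ i) (bitsN (x / 2) 1)
          = 2 * X (fun i => y * 2 ^ i) (bitsN (x / 2) 0) := by
        rw [hmap, X_map, ← X_two_mul]
        congr 1
        funext k
        rw [pow_succ]
        ring
      rw [hX, Nat.mul_comm (X (fun i => y * 2 ^ i) (bitsN (x / 2) 0)) 2]
      by_cases hp : x % 2 = 1
      · rw [if_pos hp, if_pos (show x % 2 ≠ 0 by omega),
          show X (fun i => y * 2 ^ i) [0] = y from by simp [X]]
      · rw [if_neg hp, if_neg (show ¬ x % 2 ≠ 0 by omega),
          show X (fun i => y * 2 ^ i) ([] : List Nat) = 0 from rfl]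

-- carryless multiplication is commutative: the two models agree
theorem models_eq (m n : Nat) : aN m n 0 = bN m n := by
  rw [aN_eq n m 0, Nat.zero_xor, bN_eq m n]
  have hL : (fun j => m * 2 ^ j) = fun j => X (fun k => 2 ^ (k + j)) (bitsN m 0) := by
    funext j
    rw [X_pow_bitsN m 0 j]
    simp
  rw [hL]
  rw [show (fun j => X (fun k => 2 ^ (k + j)) (bitsN m 0))
      = (fun j => X (fun k => (fun a b => 2 ^ (b + a)) j k) (bitsN m 0)) from rfl,
    X_swap (fun a b => 2 ^ (b + a)) (bitsN n 0) (bitsN m 0)]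
  congr 1
  funext k
  rw [show (fun j => 2 ^ (k + j)) = (fun j => 2 ^ (j + k)) from by funext j; rw [Nat.add_comm],
    X_pow_bitsN n 0 k]
  simp

-- Bridges from the Int ports to the Nat models
theorem xorLoop_natCast : ∀ y x r : Nat, xorLoop (x : Int) (y : Int) (r : Int) = ((aN x y r : Nat) : Int) := by
  intro y
  induction y using Nat.strong_induction_on with
  | _ y ih =>
    intro x r
    rw [xorLoop, aN]
    by_cases h : y = 0
    · simp [h]
    · have hy : (0:Int) < (y:Int) := by exact_mod_cast Nat.pos_of_ne_zero h
      rw [dif_pos hy, if_neg h]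
      have hs : ((x:Int) <<< (1:Nat)) = ((x * 2 : Nat) : Int) := by
        rw [show ((x:Int) <<< (1:Nat)) = ((x <<< 1 : Nat) : Int) from rfl, Nat.shiftLeft_eq, pow_one]
      have hr : ((y:Int) >>> (1:Nat)) = ((y / 2 : Nat) : Int) := by
        rw [show ((y:Int) >>> (1:Nat)) = ((y >>> 1 : Nat) : Int) from rfl, Nat.shiftRight_succ,
          Nat.shiftRight_zero]
      have hband : PySem.Int.band (y:Int) 1 = ((y % 2 : Nat) : Int) := by
        simpa [Nat.and_one_is_mod] using PySem.Int.band_natCast y 1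
      rw [hs, hr, hband]
      by_cases hp : y % 2 = 1
      · rw [if_pos (show ((y % 2 : Nat) : Int) = 1 by exact_mod_cast hp), if_pos hp,
          PySem.Int.bxor_natCast, ih (y / 2) (by omega)]
      · rw [if_neg (show ¬ ((y % 2 : Nat) : Int) = 1 by exact_mod_cast hp), if_neg hp,
          ih (y / 2) (by omega)]

theorem clmul_natCast : ∀ x y : Nat, clmul (x : Int) (y : Int) = ((bN x y : Nat) : Int) := by
  intro x
  induction x using Nat.strong_induction_on with
  | _ x ih =>
    intro y
    rw [clmul, bN]
    by_cases h : x = 0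
    · simp [h]
    · have hx : (0:Int) < (x:Int) := by exact_mod_cast Nat.pos_of_ne_zero h
      rw [dif_pos hx, if_neg h]
      have hq : PySem.Int.floordiv (x : Int) 2 = ((x / 2 : Nat) : Int) := by
        exact_mod_cast PySem.Int.floordiv_natCast x 2
      have hr : PySem.Int.mod (x : Int) 2 = ((x % 2 : Nat) : Int) := by
        exact_mod_cast PySem.Int.mod_natCast x 2
      rw [hq, hr]
      dsimp only
      rw [ih (x / 2) (by omega) y]
      have hmul : ((bN (x / 2) y : Nat) : Int) * 2 = ((bN (x / 2) y * 2 : Nat) : Int) := by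
        push_cast; ring
      rw [hmul]
      by_cases hp : x % 2 = 0
      · rw [if_neg (show ¬ ((x % 2 : Nat) : Int) ≠ 0 by push_neg; exact_mod_cast hp)]
        rw [if_neg (by omega : ¬ x % 2 ≠ 0)]
        rw [show (0:Int) = ((0:Nat):Int) from rfl, PySem.Int.bxor_natCast]
      · rw [if_pos (show ((x % 2 : Nat) : Int) ≠ 0 by exact_mod_cast hp)]
        rw [if_pos (by omega : x % 2 ≠ 0)]
        rw [PySem.Int.bxor_natCast]

-- ===== VERDICT (by name: the statement is the Claim_ definition above) =====
theorem xor_product_spec : Claim_equal_xor_product := by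
  intro x y _ hpre
  unfold Spec_xor_product xor_product xor_product_alt
  obtain ⟨m, rfl⟩ := Int.eq_ofNat_of_zero_le hpre.1
  obtain ⟨n, rfl⟩ := Int.eq_ofNat_of_zero_le hpre.2
  rw [if_neg (by omega), if_neg (by omega)]
  rw [show (0:Int) = ((0:Nat):Int) from rfl, xorLoop_natCast n m 0, clmul_natCast m n,
    models_eq]
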